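-- pv_equiv track=rewrite | github.com/rosie-s/courses | Udacity/02_IntroToComputerScience/Code/Lesson3/ProblemSet.py | crawl_web
-- ===== SOURCE A (Python) =====
-- def get_next_target(page):
--     start_link = page.find('<a href=')
--     if start_link == -1:
--         return None, 0
--     start_quote = page.find('"', start_link)
--     end_quote = page.find('"', start_quote + 1)
--     url = page[start_quote + 1:end_quote]
--     return url, end_quote
--
-- def union(p, q):
--     for e in q:
--         if e not in p:
--             p.append(e)
--
-- def get_all_links(page):
--     links = []
--     while True:
--         url, endpos = get_next_target(page)
--         if url:
--             links.append(url)
--             page = page[endpos:]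
--         else:
--             break
--     return links
--
-- def get_page_2(url):
--     try:
--         if url == "http://www.udacity.com/cs101x/index.html":
--             return ('<html> <body> This is a test page for learning to crawl! '
--                     '<p> It is a good idea to '
--                     '<a href="http://www.udacity.com/cs101x/crawling.html">learn to '
--                     'crawl</a> before you try to  '
--                     '<a href="http://www.udacity.com/cs101x/walking.html">walk</a> '
--                     'or  <a href="http://www.udacity.com/cs101x/flying.html">fly</a>. '
--                     '</p> </body> </html> ')
--         elif url == "http://www.udacity.com/cs101x/crawling.html":
--             return ('<html> <body> I have not learned to crawl yet, but I '
--                     'am quite good at '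
--                     '<a href="http://www.udacity.com/cs101x/kicking.html">kicking</a>.'
--                     '</body> </html>')
--         elif url == "http://www.udacity.com/cs101x/walking.html":
--             return ('<html> <body> I cant get enough '
--                     '<a href="http://www.udacity.com/cs101x/index.html">crawling</a>! '
--                     '</body> </html>')
--         elif url == "http://www.udacity.com/cs101x/flying.html":
--             return ('<html> <body> The magic words are Squeamish Ossifrage! '
--                     '</body> </html>')
--         elif url == "http://top.contributors/velak.html":
--             return ('<a href="http://top.contributors/jesyspa.html">'
--                     '<a href="http://top.contributors/forbiddenvoid.html">')
--         elif url == "http://top.contributors/jesyspa.html":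
--             return ('<a href="http://top.contributors/elssar.html">'
--                     '<a href="http://top.contributors/kilaws.html">')
--         elif url == "http://top.contributors/forbiddenvoid.html":
--             return ('<a href="http://top.contributors/charlzz.html">'
--                     '<a href="http://top.contributors/johang.html">'
--                     '<a href="http://top.contributors/graemeblake.html">')
--         elif url == "http://top.contributors/kilaws.html":
--             return ('<a href="http://top.contributors/tomvandenbosch.html">'
--                     '<a href="http://top.contributors/mathprof.html">')
--         elif url == "http://top.contributors/graemeblake.html":
--             return ('<a href="http://top.contributors/dreyescat.html">'
--                     '<a href="http://top.contributors/angel.html">')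
--         elif url == "A1":
--             return '<a href="B1"> <a href="C1">  '
--         elif url == "B1":
--             return '<a href="E1">'
--         elif url == "C1":
--             return '<a href="D1">'
--         elif url == "D1":
--             return '<a href="E1"> '
--         elif url == "E1":
--             return '<a href="F1"> '
--     except:
--         return ""
--     return ""
--
-- def crawl_web(seed, max_depth):
--     tocrawl = [seed]
--     crawled = []
--     next_depth = []
--     depth = 0
--     while tocrawl and depth <= max_depth:
--         page = tocrawl.pop()
--         if page not in crawled:
--             union(next_depth, get_all_links(get_page_2(page)))
--             crawled.append(page)
--         if not tocrawl:
--             tocrawl, next_depth = next_depth, []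
--             depth = depth + 1
--     return crawled
-- ===== SOURCE B (Python) =====
-- # The mock web is a fixed finite if-chain in get_page_2, so B skips HTML parsing
-- # entirely: a precomputed adjacency dict (url -> list of links, exactly
-- # get_all_links(get_page_2(url))) drives an explicit level-by-level BFS.
-- GRAPH = {
--     "http://www.udacity.com/cs101x/index.html": [
--         "http://www.udacity.com/cs101x/crawling.html",
--         "http://www.udacity.com/cs101x/walking.html",
--         "http://www.udacity.com/cs101x/flying.html",
--     ],
--     "http://www.udacity.com/cs101x/crawling.html": [
--         "http://www.udacity.com/cs101x/kicking.html",
--     ],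
--     "http://www.udacity.com/cs101x/walking.html": [
--         "http://www.udacity.com/cs101x/index.html",
--     ],
--     "http://www.udacity.com/cs101x/flying.html": [],
--     "http://top.contributors/velak.html": [
--         "http://top.contributors/jesyspa.html",
--         "http://top.contributors/forbiddenvoid.html",
--     ],
--     "http://top.contributors/jesyspa.html": [
--         "http://top.contributors/elssar.html",
--         "http://top.contributors/kilaws.html",
--     ],
--     "http://top.contributors/forbiddenvoid.html": [
--         "http://top.contributors/charlzz.html",
--         "http://top.contributors/johang.html",
--         "http://top.contributors/graemeblake.html",
--     ],
--     "http://top.contributors/kilaws.html": [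
--         "http://top.contributors/tomvandenbosch.html",
--         "http://top.contributors/mathprof.html",
--     ],
--     "http://top.contributors/graemeblake.html": [
--         "http://top.contributors/dreyescat.html",
--         "http://top.contributors/angel.html",
--     ],
--     "A1": ["B1", "C1"],
--     "B1": ["E1"],
--     "C1": ["D1"],
--     "D1": ["E1"],
--     "E1": ["F1"],
-- }
--
--
-- def crawl_web(seed, max_depth):
--     crawled = []
--     frontier = [seed]
--     depth = 0
--     while frontier and depth <= max_depth:
--         nxt = []
--         # reversed: the original drains its to-crawl list with pop() (LIFO)
--         for page in reversed(frontier):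
--             if page not in crawled:
--                 for link in GRAPH.get(page, []):
--                     if link not in nxt:
--                         nxt.append(link)
--                 crawled.append(page)
--         frontier = nxt
--         depth += 1
--     return crawled
-- ===== Notes on version B (the rewrite author's own statement) =====
-- stated objective: simpler
-- what changed: A re-parses HTML on every visit (string find/slice link extraction) and drains a single to-crawl stack with pop() and an in-place swap; B precomputes the finite mock web as an adjacency dict and runs an explicit level-by-level BFS over it, so no string parsing happens at all.
import Mathlib
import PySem

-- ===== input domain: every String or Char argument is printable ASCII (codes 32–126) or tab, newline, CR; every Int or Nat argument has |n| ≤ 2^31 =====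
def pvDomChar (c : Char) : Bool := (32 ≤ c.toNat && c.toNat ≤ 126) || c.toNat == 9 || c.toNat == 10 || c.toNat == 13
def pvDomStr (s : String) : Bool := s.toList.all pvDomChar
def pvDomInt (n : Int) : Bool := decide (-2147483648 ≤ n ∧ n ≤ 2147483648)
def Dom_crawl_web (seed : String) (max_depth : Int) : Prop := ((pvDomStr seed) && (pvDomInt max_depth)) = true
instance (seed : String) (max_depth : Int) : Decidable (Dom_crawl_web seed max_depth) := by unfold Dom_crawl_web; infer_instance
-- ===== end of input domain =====

-- B drops the HTML parsing entirely: the mock web is finite, so B crawls a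
-- precomputed adjacency dict with an explicit level-by-level BFS (objective: simpler).

-- ===== PORT A =====
-- get_next_target(page): returns (url or None, endpos)
def get_next_target (page : List Char) : Option (List Char) × Int :=
  let start_link := PySem.Chars.find page "<a href=".toList
  if start_link = -1 then (none, 0)
  else
    let start_quote := PySem.Chars.findFrom page ['"'] start_link none
    let end_quote := PySem.Chars.findFrom page ['"'] (start_quote + 1) none
    let url := PySem.List.slice page (some (start_quote + 1)) (some end_quote)
    (some url, end_quote)

-- while True loop -> structural recursion with a fuel guard; each step strictly
-- shrinks the page (the next url is a nonempty slice ending before endpos), so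
-- fuel = page.length + 1 is never exhausted and the guard only makes it total
def getAllLinksC : Nat -> List Char -> List String
  | 0, _ => []
  | fuel + 1, page =>
    match get_next_target page with
    | (some url, endpos) =>
      if url = [] then []
      else String.ofList url :: getAllLinksC fuel (PySem.List.slice page (some endpos) none)
    | (none, _) => []

def get_all_links (page : String) : List String := getAllLinksC (page.toList.length + 1) page.toList

-- union(p, q): append each element of q not yet in p
def union (p q : List String) : List String :=
  q.foldl (fun p e => if e ∈ p then p else p ++ [e]) p

-- get_page_2(url): the mock web (literal if-chain)
def get_page_2 (url : String) : String :=
  if url = "http://www.udacity.com/cs101x/index.html" then "<html> <body> This is a test page for learning to crawl! <p> It is a good idea to <a href=\"http://www.udacity.com/cs101x/crawling.html\">learn to crawl</a> before you try to  <a href=\"http://www.udacity.com/cs101x/walking.html\">walk</a> or  <a href=\"http://www.udacity.com/cs101x/flying.html\">fly</a>. </p> </body> </html> "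
  else if url = "http://www.udacity.com/cs101x/crawling.html" then "<html> <body> I have not learned to crawl yet, but I am quite good at <a href=\"http://www.udacity.com/cs101x/kicking.html\">kicking</a>.</body> </html>"
  else if url = "http://www.udacity.com/cs101x/walking.html" then "<html> <body> I cant get enough <a href=\"http://www.udacity.com/cs101x/index.html\">crawling</a>! </body> </html>"
  else if url = "http://www.udacity.com/cs101x/flying.html" then "<html> <body> The magic words are Squeamish Ossifrage! </body> </html>"
  else if url = "http://top.contributors/velak.html" then "<a href=\"http://top.contributors/jesyspa.html\"><a href=\"http://top.contributors/forbiddenvoid.html\">"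
  else if url = "http://top.contributors/jesyspa.html" then "<a href=\"http://top.contributors/elssar.html\"><a href=\"http://top.contributors/kilaws.html\">"
  else if url = "http://top.contributors/forbiddenvoid.html" then "<a href=\"http://top.contributors/charlzz.html\"><a href=\"http://top.contributors/johang.html\"><a href=\"http://top.contributors/graemeblake.html\">"
  else if url = "http://top.contributors/kilaws.html" then "<a href=\"http://top.contributors/tomvandenbosch.html\"><a href=\"http://top.contributors/mathprof.html\">"
  else if url = "http://top.contributors/graemeblake.html" then "<a href=\"http://top.contributors/dreyescat.html\"><a href=\"http://top.contributors/angel.html\">"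
  else if url = "A1" then "<a href=\"B1\"> <a href=\"C1\">  "
  else if url = "B1" then "<a href=\"E1\">"
  else if url = "C1" then "<a href=\"D1\">"
  else if url = "D1" then "<a href=\"E1\"> "
  else if url = "E1" then "<a href=\"F1\"> "
  else ""

-- crawl_web's while loop; tocrawl.pop() = getLastD (the guard guarantees tocrawl ≠ [], so the default is never taken)
def crawlLoopA (tocrawl crawled next_depth : List String) (depth max_depth : Int) : List String :=
  if tocrawl ≠ [] ∧ depth ≤ max_depth then
    let page := tocrawl.getLastD ""
    let rest := tocrawl.dropLast
    let crawled' := if page ∈ crawled then crawled else crawled ++ [page]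
    let nd' := if page ∈ crawled then next_depth
               else union next_depth (get_all_links (get_page_2 page))
    if rest = [] then crawlLoopA nd' crawled' [] (depth + 1) max_depth
    else crawlLoopA rest crawled' nd' depth max_depth
  else crawled
termination_by ((max_depth + 1 - depth).toNat, tocrawl.length)
decreasing_by
  · rename_i h _
    obtain ⟨_, h2⟩ := h
    exact Prod.Lex.left _ _ (by omega)
  · rename_i h _
    obtain ⟨h1, _⟩ := h
    exact Prod.Lex.right _ (by
      have h3 : 0 < tocrawl.length := List.length_pos_iff.mpr h1
      simp only [List.length_dropLast]; omega)

def crawl_web (seed : String) (max_depth : Int) : List String :=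
  crawlLoopA [seed] [] [] 0 max_depth

-- ===== PORT B =====
-- the precomputed adjacency dict GRAPH (url -> links on that mock page)
def graph : PySem.Dict String (List String) := PySem.Dict.ofList
  [ ("http://www.udacity.com/cs101x/index.html",
      ["http://www.udacity.com/cs101x/crawling.html",
       "http://www.udacity.com/cs101x/walking.html",
       "http://www.udacity.com/cs101x/flying.html"]),
    ("http://www.udacity.com/cs101x/crawling.html",
      ["http://www.udacity.com/cs101x/kicking.html"]),
    ("http://www.udacity.com/cs101x/walking.html",
      ["http://www.udacity.com/cs101x/index.html"]),
    ("http://www.udacity.com/cs101x/flying.html", []),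
    ("http://top.contributors/velak.html",
      ["http://top.contributors/jesyspa.html",
       "http://top.contributors/forbiddenvoid.html"]),
    ("http://top.contributors/jesyspa.html",
      ["http://top.contributors/elssar.html",
       "http://top.contributors/kilaws.html"]),
    ("http://top.contributors/forbiddenvoid.html",
      ["http://top.contributors/charlzz.html",
       "http://top.contributors/johang.html",
       "http://top.contributors/graemeblake.html"]),
    ("http://top.contributors/kilaws.html",
      ["http://top.contributors/tomvandenbosch.html",
       "http://top.contributors/mathprof.html"]),
    ("http://top.contributors/graemeblake.html",
      ["http://top.contributors/dreyescat.html",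
       "http://top.contributors/angel.html"]),
    ("A1", ["B1", "C1"]),
    ("B1", ["E1"]),
    ("C1", ["D1"]),
    ("D1", ["E1"]),
    ("E1", ["F1"]) ]

-- body of B's 'for page in reversed(frontier)' loop over the state (crawled, nxt):
-- look the page up in GRAPH and append its unseen links to nxt
def bstep (s : List String × List String) (page : String) : List String × List String :=
  if page ∈ s.1 then s
  else (s.1 ++ [page],
        (graph.getD page []).foldl (fun p e => if e ∈ p then p else p ++ [e]) s.2)

-- B's outer 'while frontier and depth <= max_depth' loop
def crawlLoopB (frontier crawled : List String) (depth max_depth : Int) : List String :=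
  if frontier ≠ [] ∧ depth ≤ max_depth then
    let s := frontier.reverse.foldl bstep (crawled, [])
    crawlLoopB s.2 s.1 (depth + 1) max_depth
  else crawled
termination_by (max_depth + 1 - depth).toNat
decreasing_by omega

def crawl_web_alt (seed : String) (max_depth : Int) : List String :=
  crawlLoopB [seed] [] 0 max_depth

-- ===== PRECONDITION & SPEC =====
def Spec_crawl_web (seed : String) (max_depth : Int) (out : List String) : Prop := out = crawl_web_alt seed max_depth
instance (seed : String) (max_depth : Int) (out : List String) : Decidable (Spec_crawl_web seed max_depth out) := by unfold Spec_crawl_web; infer_instance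

-- ===== CLAIM (what is proved, stated in full; the proofs are below) =====
def Claim_equal_crawl_web : Prop := ∀ (seed : String) (max_depth : Int), Dom_crawl_web seed max_depth → Spec_crawl_web seed max_depth (crawl_web seed max_depth)

-- ===== LEMMAS AND PROOFS =====

-- the links A parses out of the mock page of any url are exactly B's GRAPH entry
set_option maxHeartbeats 4000000 in
set_option maxRecDepth 100000 in
theorem links_eq_graph (url : String) :
    get_all_links (get_page_2 url) = graph.getD url [] := by
  have hmk : graph = PySem.Dict.mk [("http://www.udacity.com/cs101x/index.html", ["http://www.udacity.com/cs101x/crawling.html", "http://www.udacity.com/cs101x/walking.html", "http://www.udacity.com/cs101x/flying.html"]), ("http://www.udacity.com/cs101x/crawling.html", ["http://www.udacity.com/cs101x/kicking.html"]), ("http://www.udacity.com/cs101x/walking.html", ["http://www.udacity.com/cs101x/index.html"]), ("http://www.udacity.com/cs101x/flying.html", []), ("http://top.contributors/velak.html", ["http://top.contributors/jesyspa.html", "http://top.contributors/forbiddenvoid.html"]), ("http://top.contributors/jesyspa.html", ["http://top.contributors/elssar.html", "http://top.contributors/kilaws.html"]), ("http://top.contributors/forbiddenvoid.html", ["http://top.contributors/charlzz.html",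 "http://top.contributors/johang.html", "http://top.contributors/graemeblake.html"]), ("http://top.contributors/kilaws.html", ["http://top.contributors/tomvandenbosch.html", "http://top.contributors/mathprof.html"]), ("http://top.contributors/graemeblake.html", ["http://top.contributors/dreyescat.html", "http://top.contributors/angel.html"]), ("A1", ["B1", "C1"]), ("B1", ["E1"]), ("C1", ["D1"]), ("D1", ["E1"]), ("E1", ["F1"])] := by decide
  by_cases h1 : url = "http://www.udacity.com/cs101x/index.html"
  · subst h1; decide
  by_cases h2 : url = "http://www.udacity.com/cs101x/crawling.html"
  · subst h2; decide
  by_cases h3 : url = "http://www.udacity.com/cs101x/walking.html"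
  · subst h3; decide
  by_cases h4 : url = "http://www.udacity.com/cs101x/flying.html"
  · subst h4; decide
  by_cases h5 : url = "http://top.contributors/velak.html"
  · subst h5; decide
  by_cases h6 : url = "http://top.contributors/jesyspa.html"
  · subst h6; decide
  by_cases h7 : url = "http://top.contributors/forbiddenvoid.html"
  · subst h7; decide
  by_cases h8 : url = "http://top.contributors/kilaws.html"
  · subst h8; decide
  by_cases h9 : url = "http://top.contributors/graemeblake.html"
  · subst h9; decide
  by_cases h10 : url = "A1"
  · subst h10; decide
  by_cases h11 : url = "B1"
  · subst h11; decide
  by_cases h12 : url = "C1"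
  · subst h12; decide
  by_cases h13 : url = "D1"
  · subst h13; decide
  by_cases h14 : url = "E1"
  · subst h14; decide
  rw [get_page_2, if_neg h1, if_neg h2, if_neg h3, if_neg h4, if_neg h5, if_neg h6, if_neg h7, if_neg h8, if_neg h9, if_neg h10, if_neg h11, if_neg h12, if_neg h13, if_neg h14, hmk]
  simp [PySem.Dict.getD_eq_get?_getD, PySem.Dict.get?, Ne.symm h1, Ne.symm h2, Ne.symm h3, Ne.symm h4, Ne.symm h5, Ne.symm h6, Ne.symm h7, Ne.symm h8, Ne.symm h9, Ne.symm h10, Ne.symm h11, Ne.symm h12, Ne.symm h13, Ne.symm h14]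
  decide

-- one A-iteration on the popped page is one bstep of B
theorem astep_eq_bstep (crawled nd : List String) (page : String) :
    ((if page ∈ crawled then crawled else crawled ++ [page]),
     (if page ∈ crawled then nd else union nd (get_all_links (get_page_2 page))))
      = bstep (crawled, nd) page := by
  by_cases h : page ∈ crawled <;> simp [bstep, h, union, links_eq_graph]

-- A's loop drains one whole level (popping from the end = foldl over the reverse) before swapping
theorem levelA (max_depth : Int) :
    ∀ n (tocrawl : List String), tocrawl.length ≤ n → tocrawl ≠ [] →
    ∀ crawled nd depth, depth ≤ max_depth →
    crawlLoopA tocrawl crawled nd depth max_depth =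
      crawlLoopA (tocrawl.reverse.foldl bstep (crawled, nd)).2
        (tocrawl.reverse.foldl bstep (crawled, nd)).1 [] (depth + 1) max_depth := by
  intro n
  induction n with
  | zero =>
    intro t ht hne
    cases t with
    | nil => exact absurd rfl hne
    | cons a t => simp at ht
  | succ n ih =>
    intro t ht hne crawled nd depth hd
    rcases List.eq_nil_or_concat t with rfl | ⟨L, b, rfl⟩
    · exact absurd rfl hne
    · rw [crawlLoopA, if_pos ⟨hne, hd⟩]
      simp only [List.concat_eq_append, List.getLastD_concat, List.dropLast_concat,
        List.reverse_append, List.reverse_cons, List.reverse_nil, List.nil_append,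
        List.singleton_append, List.foldl_cons]
      by_cases hL : L = []
      · subst hL
        rw [if_pos rfl, ← astep_eq_bstep]
        simp
      · rw [if_neg hL, ← astep_eq_bstep]
        have hlen : L.length ≤ n := by
          have h5 := ht; simp [List.concat_eq_append, List.length_append] at h5; omega
        exact ih L hlen hL _ _ depth hd

-- the two loops agree when a level starts (A's next_depth = [])
theorem loops_agree (max_depth : Int) :
    ∀ n (depth : Int), (max_depth + 1 - depth).toNat ≤ n →
    ∀ frontier crawled,
    crawlLoopA frontier crawled [] depth max_depth = crawlLoopB frontier crawled depth max_depth := by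
  intro n
  induction n with
  | zero =>
    intro depth hz frontier crawled
    have hc : ¬ (frontier ≠ [] ∧ depth ≤ max_depth) := by
      intro hx; omega
    rw [crawlLoopA, crawlLoopB, if_neg hc, if_neg hc]
  | succ n ih =>
    intro depth hn frontier crawled
    by_cases hf : frontier = []
    · have hc : ¬ (frontier ≠ [] ∧ depth ≤ max_depth) := by tauto
      rw [crawlLoopA, crawlLoopB, if_neg hc, if_neg hc]
    · by_cases hd : depth ≤ max_depth
      · rw [levelA max_depth frontier.length frontier (le_refl _) hf crawled [] depth hd]
        rw [crawlLoopB, if_pos ⟨hf, hd⟩]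
        exact ih (depth + 1) (by omega) _ _
      · have hc : ¬ (frontier ≠ [] ∧ depth ≤ max_depth) := by tauto
        rw [crawlLoopA, crawlLoopB, if_neg hc, if_neg hc]

-- ===== VERDICT (by name: the statement is the Claim_ definition above) =====
theorem crawl_web_spec : Claim_equal_crawl_web := by
  intro seed max_depth _
  unfold Spec_crawl_web crawl_web crawl_web_alt
  exact loops_agree max_depth _ 0 (le_refl _) [seed] []
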